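-- pv_equiv track=rewrite | github.com/zulumonkeymetallic/bob | tools/browser_tool.py | _truncate_snapshot
-- ===== SOURCE A (Python) =====
-- def _truncate_snapshot(snapshot_text: str, max_chars: int = 8000) -> str:
--     """Structure-aware truncation for snapshots.
--
--     Cuts at line boundaries so that accessibility tree elements are never
--     split mid-line, and appends a note telling the agent how much was
--     omitted.
--
--     Args:
--         snapshot_text: The snapshot text to truncate
--         max_chars: Maximum characters to keep
--
--     Returns:
--         Truncated text with indicator if truncated
--     """
--     if len(snapshot_text) <= max_chars:
--         return snapshot_text
--
--     lines = snapshot_text.split('\n')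
--     result: list[str] = []
--     chars = 0
--     for line in lines:
--         if chars + len(line) + 1 > max_chars - 80:  # reserve space for note
--             break
--         result.append(line)
--         chars += len(line) + 1
--     remaining = len(lines) - len(result)
--     if remaining > 0:
--         result.append(f'\n[... {remaining} more lines truncated, use browser_snapshot for full content]')
--     return '\n'.join(result)
-- ===== SOURCE B (Python) =====
-- def _truncate_snapshot(snapshot_text: str, max_chars: int = 8000) -> str:
--     """Slice-and-search re-implementation: instead of splitting into lines and
--     accumulating, cut the raw text at the last newline inside the budget window
--     and count the omitted lines with str.count."""
--     if len(snapshot_text) <= max_chars: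
--         return snapshot_text
--
--     window = snapshot_text[:max(0, max_chars - 80)]
--     cut = window.rfind('\n')
--     if cut < 0:
--         remaining = snapshot_text.count('\n') + 1
--         return f'\n[... {remaining} more lines truncated, use browser_snapshot for full content]'
--     remaining = snapshot_text[cut + 1:].count('\n') + 1
--     return snapshot_text[:cut] + f'\n\n[... {remaining} more lines truncated, use browser_snapshot for full content]'
-- ===== Notes on version B (the rewrite author's own statement) =====
-- stated objective: alternative
-- what changed: Instead of splitting into lines and accumulating their lengths in an early-breaking loop, B slices the raw text to the max_chars-80 budget window, cuts at the window's last newline found with str.rfind, and derives the omitted-line count from str.count on the tail.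
import Mathlib
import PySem

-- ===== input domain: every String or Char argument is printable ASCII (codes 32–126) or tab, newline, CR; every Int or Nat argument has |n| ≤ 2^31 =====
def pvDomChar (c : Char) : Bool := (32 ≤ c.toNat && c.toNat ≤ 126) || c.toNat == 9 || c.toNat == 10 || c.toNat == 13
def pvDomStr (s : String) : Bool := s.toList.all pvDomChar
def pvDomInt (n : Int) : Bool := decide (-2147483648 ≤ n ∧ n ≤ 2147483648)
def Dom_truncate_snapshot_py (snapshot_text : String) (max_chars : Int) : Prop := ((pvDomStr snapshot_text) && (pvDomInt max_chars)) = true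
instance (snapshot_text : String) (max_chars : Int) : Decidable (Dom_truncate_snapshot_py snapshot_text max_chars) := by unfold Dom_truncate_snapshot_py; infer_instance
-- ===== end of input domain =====

-- B replaces A's split-into-lines + early-breaking accumulation loop by slicing the raw
-- text to the budget window, cutting at the window's last newline (rfind) and counting
-- the omitted lines on the tail (objective: alternative; same return value everywhere).

-- ===== PORT A =====
-- A's for-loop with break: accumulate lines while chars + len(line) + 1 ≤ budget
def pvTruncLoop (lines : List String) (chars : Int) (budget : Int) : List String :=
  match lines with
  | [] => []
  | l :: ls =>
    if chars + PySem.Str.len l + 1 > budget then []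
    else l :: pvTruncLoop ls (chars + PySem.Str.len l + 1) budget

def truncate_snapshot_py (snapshot_text : String) (max_chars : Int) : String :=
  if PySem.Str.len snapshot_text ≤ max_chars then snapshot_text
  else
    let lines := (PySem.Str.split? snapshot_text "\n").getD []  -- sep is the nonempty literal "\n", so split? = some
    let result := pvTruncLoop lines 0 (max_chars - 80)
    let remaining : Int := (lines.length : Int) - (result.length : Int)
    let result := if remaining > 0 then
        result ++ ["\n[... " ++ PySem.Int.toStr remaining ++ " more lines truncated, use browser_snapshot for full content]"]
      else result
    PySem.Str.join "\n" result

-- ===== PORT B =====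
def truncate_snapshot_py_alt (snapshot_text : String) (max_chars : Int) : String :=
  if PySem.Str.len snapshot_text ≤ max_chars then snapshot_text
  else
    let window := PySem.Str.slice snapshot_text none (some (max 0 (max_chars - 80)))
    let cut := PySem.Str.rfind window "\n"
    if cut < 0 then
      "\n[... " ++ PySem.Int.toStr ((PySem.Str.count snapshot_text "\n" : Int) + 1)
        ++ " more lines truncated, use browser_snapshot for full content]"
    else
      PySem.Str.slice snapshot_text none (some cut)
        ++ "\n\n[... "
        ++ PySem.Int.toStr ((PySem.Str.count (PySem.Str.slice snapshot_text (some (cut + 1)) none) "\n" : Int) + 1)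
        ++ " more lines truncated, use browser_snapshot for full content]"

-- ===== PRECONDITION & SPEC =====
def Spec_truncate_snapshot_py (snapshot_text : String) (max_chars : Int) (out : String) : Prop := out = truncate_snapshot_py_alt snapshot_text max_chars
instance (snapshot_text : String) (max_chars : Int) (out : String) : Decidable (Spec_truncate_snapshot_py snapshot_text max_chars out) := by unfold Spec_truncate_snapshot_py; infer_instance

-- ===== CLAIM (what is proved, stated in full; the proofs are below) =====
def Claim_equal_truncate_snapshot_py : Prop := ∀ (snapshot_text : String) (max_chars : Int), Dom_truncate_snapshot_py snapshot_text max_chars → Spec_truncate_snapshot_py snapshot_text max_chars (truncate_snapshot_py snapshot_text max_chars)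

-- ===== LEMMAS AND PROOFS =====

/-- The note appended after the kept lines, at the `List Char` level. -/
def pvNoteC (r : Int) : List Char :=
  "\n[... ".toList ++ PySem.Int.toChars r ++ " more lines truncated, use browser_snapshot for full content]".toList

/-- `cs.split('\n')` as a structural recursion over the characters. -/
def pvLinesC : List Char → List (List Char)
  | [] => [[]]
  | c :: t =>
    let r := pvLinesC t
    if c = '\n' then [] :: r else (c :: r.headI) :: r.tail

/-- Index of the last `'\n'` of a char list (Python `rfind`), −1 if absent. -/
def pvRLast : List Char → Int
  | [] => -1
  | c :: t => if 0 ≤ pvRLast t then pvRLast t + 1 else if c = '\n' then 0 else -1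

/-- A's kept lines, rephrased with a shrinking budget instead of a growing counter. -/
def keptC : List (List Char) → Int → List (List Char)
  | [], _ => []
  | l :: ls, b => if (l.length : Int) + 1 > b then [] else l :: keptC ls (b - l.length - 1)

/-- The char-level core of B's else-branch. -/
def pvBCore (cs : List Char) (b : Int) : List Char :=
  let cut := pvRLast (cs.take (max 0 b).toNat)
  if cut < 0 then pvNoteC ((cs.count '\n' : Int) + 1)
  else cs.take cut.toNat ++ '\n' :: pvNoteC (((cs.drop (cut.toNat + 1)).count '\n' : Int) + 1)

lemma pvLinesC_ne_nil (cs : List Char) : pvLinesC cs ≠ [] := by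
  cases cs with
  | nil => simp [pvLinesC]
  | cons c t => by_cases h : c = '\n' <;> simp [pvLinesC, h]

lemma pvLinesC_cons_nl (t : List Char) : pvLinesC ('\n' :: t) = [] :: pvLinesC t := by
  simp [pvLinesC]

lemma pvLinesC_cons (c : Char) (t x : List Char) (xs : List (List Char)) (h : c ≠ '\n')
    (hr : pvLinesC t = x :: xs) : pvLinesC (c :: t) = (c :: x) :: xs := by
  simp [pvLinesC, h, hr]

lemma keptC_cons (l : List Char) (ls : List (List Char)) (b : Int) :
    keptC (l :: ls) b = if (l.length : Int) + 1 > b then [] else l :: keptC ls (b - l.length - 1) := rfl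

lemma pvTruncLoop_cons (l : String) (ls : List String) (chars budget : Int) :
    pvTruncLoop (l :: ls) chars budget =
      if chars + PySem.Str.len l + 1 > budget then []
      else l :: pvTruncLoop ls (chars + PySem.Str.len l + 1) budget := rfl

lemma join_cons_head (sep : List Char) (c : Char) (l : List Char) (ls : List (List Char)) :
    PySem.Chars.join sep ((c :: l) :: ls) = c :: PySem.Chars.join sep (l :: ls) := by
  cases ls with
  | nil => simp [PySem.Chars.join_singleton]
  | cons q rest => simp [PySem.Chars.join_cons_cons]

lemma join_pvLinesC (cs : List Char) : PySem.Chars.join ['\n'] (pvLinesC cs) = cs := by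
  induction cs with
  | nil => simp [pvLinesC, PySem.Chars.join_singleton]
  | cons c t ih =>
    by_cases h : c = '\n'
    · subst h
      rcases hr : pvLinesC t with _ | ⟨x, xs⟩
      · exact absurd hr (pvLinesC_ne_nil t)
      · rw [pvLinesC_cons_nl, hr, PySem.Chars.join_cons_cons, List.nil_append,
          List.singleton_append, ← hr, ih]
    · rcases hr : pvLinesC t with _ | ⟨x, xs⟩
      · exact absurd hr (pvLinesC_ne_nil t)
      · rw [pvLinesC_cons c t x xs h hr, join_cons_head, ← hr, ih]

lemma pvLinesC_no_nl (cs : List Char) : ∀ l ∈ pvLinesC cs, '\n' ∉ l := by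
  induction cs with
  | nil => intro l hl; simp [pvLinesC] at hl; simp [hl]
  | cons c t ih =>
    intro l hl
    by_cases h : c = '\n'
    · subst h
      rw [pvLinesC_cons_nl] at hl
      rcases List.mem_cons.mp hl with rfl | hl
      · simp
      · exact ih l hl
    · rcases hr : pvLinesC t with _ | ⟨x, xs⟩
      · exact absurd hr (pvLinesC_ne_nil t)
      · rw [pvLinesC_cons c t x xs h hr] at hl
        rcases List.mem_cons.mp hl with rfl | hl
        · intro hmem
          rcases List.mem_cons.mp hmem with rfl | hmem
          · exact h rfl
          · exact ih x (by rw [hr]; simp) hmem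
        · exact ih l (by rw [hr]; simp [hl])

/-- Head-patching helper describing `splitOn.go`'s accumulator. -/
def pvConsH (p : List Char) : List (List Char) → List (List Char)
  | [] => [p]
  | x :: xs => (p ++ x) :: xs

lemma splitOn_go_eq (l : List Char) : ∀ (fuel : Nat) (cur : List Char) (acc : List (List Char)),
    l.length ≤ fuel →
    PySem.Chars.splitOn.go ['\n'] fuel l cur acc = acc.reverse ++ pvConsH cur.reverse (pvLinesC l) := by
  induction l with
  | nil =>
    intro fuel cur acc _
    cases fuel <;> simp [PySem.Chars.splitOn.go, pvLinesC, pvConsH]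
  | cons c t ih =>
    intro fuel cur acc hf
    cases fuel with
    | zero => simp at hf
    | succ f =>
      rw [PySem.Chars.splitOn.go]
      by_cases h : c = '\n'
      · subst h
        have hpre : ['\n'].isPrefixOf ('\n' :: t) = true := by simp [List.isPrefixOf]
        rw [if_pos hpre]
        have hdrop : List.drop ['\n'].length ('\n' :: t) = t := rfl
        rw [hdrop, ih f [] (cur.reverse :: acc) (by simpa using hf), pvLinesC_cons_nl]
        rcases hr : pvLinesC t with _ | ⟨x, xs⟩
        · exact absurd hr (pvLinesC_ne_nil t)
        · simp [pvConsH]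
      · have hpre : ['\n'].isPrefixOf (c :: t) = false := by
          simp [List.isPrefixOf]; intro hc; exact absurd hc.symm h
        simp only [hpre, Bool.false_eq_true, if_false]
        rw [ih f (c :: cur) acc (by simpa using Nat.le_of_succ_le_succ hf)]
        rcases hr : pvLinesC t with _ | ⟨x, xs⟩
        · exact absurd hr (pvLinesC_ne_nil t)
        · rw [pvLinesC_cons c t x xs h hr]
          simp [pvConsH]

lemma splitOn_eq (cs : List Char) : PySem.Chars.splitOn cs ['\n'] = pvLinesC cs := by
  unfold PySem.Chars.splitOn
  rw [splitOn_go_eq cs (cs.length + 1) [] [] (by omega)]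
  rcases hr : pvLinesC cs with _ | ⟨x, xs⟩
  · exact absurd hr (pvLinesC_ne_nil cs)
  · simp [pvConsH]

lemma count_go_eq (l : List Char) : ∀ (fuel : Nat) (acc : Nat), l.length ≤ fuel →
    PySem.Chars.count.go ['\n'] fuel l acc = acc + l.count '\n' := by
  induction l with
  | nil => intro fuel acc _; cases fuel <;> simp [PySem.Chars.count.go]
  | cons c t ih =>
    intro fuel acc hf
    cases fuel with
    | zero => simp at hf
    | succ f =>
      rw [PySem.Chars.count.go]
      by_cases h : c = '\n'
      · subst h
        have hpre : ['\n'].isPrefixOf ('\n' :: t) = true := by simp [List.isPrefixOf]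
        rw [if_pos hpre]
        have hdrop : List.drop ['\n'].length ('\n' :: t) = t := rfl
        rw [hdrop, ih f (acc + 1) (by simpa using hf)]
        simp
        omega
      · have hpre : ['\n'].isPrefixOf (c :: t) = false := by
          simp [List.isPrefixOf]; intro hc; exact absurd hc.symm h
        simp only [hpre, Bool.false_eq_true, if_false]
        rw [ih f acc (by simpa using Nat.le_of_succ_le_succ hf)]
        simp [h]

lemma countC_eq (cs : List Char) : PySem.Chars.count cs ['\n'] = cs.count '\n' := by
  unfold PySem.Chars.count
  simp only [List.isEmpty_cons, Bool.false_eq_true, if_false]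
  rw [count_go_eq cs cs.length 0 le_rfl, Nat.zero_add]

lemma pvRLast_bounds (l : List Char) : -1 ≤ pvRLast l ∧ pvRLast l < l.length := by
  induction l with
  | nil => simp [pvRLast]
  | cons c t ih =>
    obtain ⟨ih1, ih2⟩ := ih
    have hL : pvRLast (c :: t)
        = if 0 ≤ pvRLast t then pvRLast t + 1 else if c = '\n' then 0 else -1 := rfl
    have hlen : (((c :: t).length : Nat) : Int) = (t.length : Int) + 1 := by simp
    rw [hL, hlen]
    split_ifs with h1 h2
    · exact ⟨by omega, by omega⟩
    · exact ⟨by omega, by omega⟩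
    · exact ⟨by omega, by omega⟩

lemma pvRLast_of_no_nl (l : List Char) (h : '\n' ∉ l) : pvRLast l = -1 := by
  induction l with
  | nil => rfl
  | cons c t ih =>
    have hc : c ≠ '\n' := fun hc => h (by simp [hc])
    have ht := ih (fun hm => h (List.mem_cons_of_mem c hm))
    simp [pvRLast, ht, hc]

lemma pvRLast_append_singleton (xs : List Char) (c : Char) :
    pvRLast (xs ++ [c]) = if c = '\n' then (xs.length : Int) else pvRLast xs := by
  induction xs with
  | nil => by_cases h : c = '\n' <;> simp [pvRLast, h]
  | cons a t ih =>
    have hL : pvRLast ((a :: t) ++ [c])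
        = if 0 ≤ pvRLast (t ++ [c]) then pvRLast (t ++ [c]) + 1 else if a = '\n' then 0 else -1 := rfl
    have hR : pvRLast (a :: t) = if 0 ≤ pvRLast t then pvRLast t + 1 else if a = '\n' then 0 else -1 := rfl
    rw [hL, ih, hR]
    by_cases h : c = '\n'
    · simp only [if_pos h]
      rw [if_pos (by positivity : (0 : Int) ≤ (t.length : Int))]
      simp only [List.length_cons]
      push_cast
      ring
    · simp only [if_neg h]

lemma pvRLast_append_nl (l w : List Char) (hl : '\n' ∉ l) :
    pvRLast (l ++ '\n' :: w) = if 0 ≤ pvRLast w then (l.length : Int) + 1 + pvRLast w else (l.length : Int) := by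
  induction l with
  | nil =>
    rw [List.nil_append]
    have hL : pvRLast ('\n' :: w)
        = if 0 ≤ pvRLast w then pvRLast w + 1 else if ('\n' : Char) = '\n' then 0 else -1 := rfl
    rw [hL, if_pos (rfl : ('\n' : Char) = '\n')]
    simp only [List.length_nil, Nat.cast_zero]
    split_ifs <;> omega
  | cons c t ih =>
    have hc : c ≠ '\n' := fun hc => hl (by simp [hc])
    have ht := ih (fun hm => hl (List.mem_cons_of_mem c hm))
    have hL : pvRLast ((c :: t) ++ '\n' :: w)
        = if 0 ≤ pvRLast (t ++ '\n' :: w) then pvRLast (t ++ '\n' :: w) + 1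
          else if c = '\n' then 0 else -1 := rfl
    rw [hL, ht]
    by_cases hw : 0 ≤ pvRLast w
    · simp only [if_pos hw]
      rw [if_pos (by omega : (0 : Int) ≤ (t.length : Int) + 1 + pvRLast w)]
      simp only [List.length_cons]
      push_cast
      ring
    · simp only [if_neg hw]
      rw [if_pos (by positivity : (0 : Int) ≤ (t.length : Int))]
      simp only [List.length_cons]
      push_cast
      ring

lemma rfind_go_eq (s : List Char) : ∀ j : Nat, j ≤ s.length →
    PySem.Chars.rfind.go s ['\n'] j = pvRLast (s.take (j + 1)) := by
  intro j
  induction j with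
  | zero =>
    intro _
    rw [PySem.Chars.rfind.go]
    cases s with
    | nil => simp [List.isPrefixOf, pvRLast]
    | cons c t =>
      by_cases h : c = '\n'
      · simp [List.isPrefixOf, h, pvRLast]
      · have : ('\n' == c) = false := by simp [Ne.symm h]
        simp [List.isPrefixOf, this, pvRLast, h]
  | succ j ih =>
    intro hj
    rw [PySem.Chars.rfind.go]
    by_cases hlt : j + 1 < s.length
    · have hdrop : s.drop (j + 1) = s[j+1] :: s.drop (j + 2) := by
        rw [List.drop_eq_getElem_cons hlt]
      have htake : s.take (j + 2) = s.take (j + 1) ++ [s[j+1]] := by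
        rw [List.take_add_one, List.getElem?_eq_getElem hlt]
        rfl
      by_cases h : s[j+1] = '\n'
      · have hpre : ['\n'].isPrefixOf (s.drop (j + 1)) = true := by
          rw [hdrop]; simp [List.isPrefixOf, h]
        rw [if_pos hpre, htake, pvRLast_append_singleton, if_pos h]
        simp [List.length_take, Nat.min_eq_left (Nat.le_of_lt hlt)]
      · have hpre : ['\n'].isPrefixOf (s.drop (j + 1)) = false := by
          rw [hdrop]; simp [List.isPrefixOf]; intro hc; exact absurd hc.symm h
        rw [hpre]
        simp only [Bool.false_eq_true, if_false]
        rw [ih (by omega), htake, pvRLast_append_singleton, if_neg h]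
    · have hdrop : s.drop (j + 1) = [] := by rw [List.drop_eq_nil_iff]; omega
      rw [hdrop]
      have hpre : (['\n'] : List Char).isPrefixOf [] = false := by simp [List.isPrefixOf]
      rw [hpre]
      simp only [Bool.false_eq_true, if_false]
      rw [ih (by omega)]
      rw [List.take_of_length_le (by omega), List.take_of_length_le (by omega)]

lemma rfindC_eq (cs : List Char) : PySem.Chars.rfind cs ['\n'] = pvRLast cs := by
  unfold PySem.Chars.rfind
  rw [rfind_go_eq cs cs.length le_rfl, List.take_of_length_le (by omega)]

lemma count_join (L : List (List Char)) : L ≠ [] → (∀ l ∈ L, '\n' ∉ l) →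
    (PySem.Chars.join ['\n'] L).count '\n' + 1 = L.length := by
  induction L with
  | nil => intro h; exact absurd rfl h
  | cons l ls ih =>
    intro _ hnl
    have hl : '\n' ∉ l := hnl l (by simp)
    cases ls with
    | nil => rw [PySem.Chars.join_singleton]; simp [List.count_eq_zero_of_not_mem hl]
    | cons q rest =>
      have ih' := ih (by simp) (fun x hx => hnl x (List.mem_cons_of_mem l hx))
      rw [PySem.Chars.join_cons_cons]
      have h1 : List.count '\n' (['\n'] : List Char) = 1 := by decide
      simp only [List.count_append, List.count_eq_zero_of_not_mem hl, h1, List.length_cons] at *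
      omega

lemma join_cons_of_ne_nil (l : List Char) (ls : List (List Char)) (h : ls ≠ []) :
    PySem.Chars.join ['\n'] (l :: ls) = l ++ '\n' :: PySem.Chars.join ['\n'] ls := by
  cases ls with
  | nil => exact absurd rfl h
  | cons q rest => rw [PySem.Chars.join_cons_cons]; simp

lemma take_join_le (l : List Char) (ls : List (List Char)) (n : Nat) (hn : n ≤ l.length) :
    (PySem.Chars.join ['\n'] (l :: ls)).take n = l.take n := by
  cases ls with
  | nil => rw [PySem.Chars.join_singleton]
  | cons q rest =>
    rw [join_cons_of_ne_nil l _ (by simp)]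
    exact List.take_append_of_le_length hn

lemma keptC_lt (L : List (List Char)) : ∀ b : Int, L ≠ [] →
    b ≤ ((PySem.Chars.join ['\n'] L).length : Int) → (keptC L b).length < L.length := by
  induction L with
  | nil => intro b h; exact absurd rfl h
  | cons l ls ih =>
    intro b _ hb
    by_cases h : (l.length : Int) + 1 > b
    · rw [keptC_cons, if_pos h]; simp
    · cases ls with
      | nil => rw [PySem.Chars.join_singleton] at hb; omega
      | cons q rest =>
        rw [join_cons_of_ne_nil l (q :: rest) (by simp)] at hb
        simp only [List.length_append, List.length_cons] at hb
        have := ih (b - l.length - 1) (by simp) (by omega)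
        rw [keptC_cons, if_neg h, List.length_cons, List.length_cons]
        omega

lemma take_append_add {a : Type} (l r : List a) (k : Nat) :
    (l ++ r).take (l.length + k) = l ++ r.take k := by
  rw [List.take_append, List.take_of_length_le (by omega), Nat.add_sub_cancel_left]

lemma drop_append_add {a : Type} (l r : List a) (k : Nat) :
    (l ++ r).drop (l.length + k) = r.drop k := by
  rw [List.drop_append, List.drop_of_length_le (by omega), Nat.add_sub_cancel_left,
    List.nil_append]

lemma pvBCore_small (cs : List Char) (b : Int) (h : '\n' ∉ cs.take (max 0 b).toNat) :
    pvBCore cs b = pvNoteC ((cs.count '\n' : Int) + 1) := by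
  simp only [pvBCore, pvRLast_of_no_nl _ h]
  norm_num

lemma pvBCore_step (l cs' : List Char) (b : Int) (hl : '\n' ∉ l) (hb : (l.length : Int) + 1 ≤ b) :
    pvBCore (l ++ '\n' :: cs') b = l ++ '\n' :: pvBCore cs' (b - l.length - 1) := by
  have hmaxb : max 0 b = b := max_eq_right (by omega)
  have hmaxb' : max 0 (b - l.length - 1) = b - l.length - 1 := max_eq_right (by omega)
  have hbtn : (max 0 b).toNat = l.length + ((b - l.length - 1).toNat + 1) := by
    rw [hmaxb]; omega
  simp only [pvBCore, hmaxb']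
  rw [hbtn, take_append_add, List.take_succ_cons]
  rw [pvRLast_append_nl l _ hl]
  set cut' := pvRLast (cs'.take (b - (l.length : Int) - 1).toNat) with hcut'
  have hcb := pvRLast_bounds (cs'.take (b - (l.length : Int) - 1).toNat)
  by_cases hge : 0 ≤ cut'
  · rw [if_pos hge, if_neg (by omega : ¬ ((l.length : Int) + 1 + cut' < 0)),
      if_neg (by omega : ¬ (cut' < 0))]
    have htn : ((l.length : Int) + 1 + cut').toNat = l.length + (cut'.toNat + 1) := by omega
    rw [htn, take_append_add, List.take_succ_cons]
    rw [show l.length + (cut'.toNat + 1) + 1 = l.length + ((cut'.toNat + 1) + 1) by omega,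
      drop_append_add, List.drop_succ_cons]
    simp
  · rw [if_neg hge, if_pos (by omega : cut' < 0),
      if_neg (by omega : ¬ ((l.length : Int) < 0))]
    have htn : ((l.length : Int)).toNat = l.length := by omega
    rw [htn]
    rw [show l.length + 1 = l.length + (0 + 1) by omega, drop_append_add, List.drop_succ_cons,
      List.drop_zero]
    rw [show l.length = l.length + 0 by omega, take_append_add, List.take_zero, List.append_nil]

lemma pv_master (L : List (List Char)) : ∀ b : Int, L ≠ [] → (∀ l ∈ L, '\n' ∉ l) →
    b ≤ ((PySem.Chars.join ['\n'] L).length : Int) →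
    PySem.Chars.join ['\n'] (keptC L b ++ [pvNoteC ((L.length : Int) - ((keptC L b).length : Int))])
      = pvBCore (PySem.Chars.join ['\n'] L) b := by
  induction L with
  | nil => intro b h; exact absurd rfl h
  | cons l ls ih =>
    intro b _ hnl hb
    have hl : '\n' ∉ l := hnl l (by simp)
    by_cases hfit : (l.length : Int) + 1 > b
    · have hk : keptC (l :: ls) b = [] := by rw [keptC_cons, if_pos hfit]
      have hwn : (max 0 b).toNat ≤ l.length := by
        rw [Int.toNat_le]
        exact max_le (by positivity) (by omega)
      have hwnl : '\n' ∉ (PySem.Chars.join ['\n'] (l :: ls)).take (max 0 b).toNat := by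
        rw [take_join_le l ls _ hwn]
        intro hm; exact hl (List.take_subset _ _ hm)
      rw [hk, pvBCore_small _ b hwnl, List.nil_append, PySem.Chars.join_singleton]
      congr 1
      have hcount := count_join (l :: ls) (by simp) hnl
      simp only [List.length_nil, Nat.cast_zero, sub_zero]
      omega
    · cases ls with
      | nil => rw [PySem.Chars.join_singleton] at hb; omega
      | cons q rest =>
        have hlsne : (q :: rest : List (List Char)) ≠ [] := by simp
        have hjoin := join_cons_of_ne_nil l (q :: rest) hlsne
        have hblen : b - l.length - 1 ≤ ((PySem.Chars.join ['\n'] (q :: rest)).length : Int) := by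
          rw [hjoin] at hb
          simp only [List.length_append, List.length_cons] at hb
          omega
        have ihh := ih (b - l.length - 1) hlsne (fun x hx => hnl x (List.mem_cons_of_mem l hx)) hblen
        have hk : keptC (l :: q :: rest) b = l :: keptC (q :: rest) (b - l.length - 1) := by
          rw [keptC_cons, if_neg hfit]
        rw [hk]
        rw [show ((l :: q :: rest).length : Int) - ((l :: keptC (q :: rest) (b - l.length - 1)).length : Int)
            = ((q :: rest).length : Int) - ((keptC (q :: rest) (b - l.length - 1)).length : Int) by
          simp only [List.length_cons]; push_cast; ring]
        rw [List.cons_append, join_cons_of_ne_nil _ _ (by simp), hjoin,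
          pvBCore_step l _ b hl (by omega), ihh]

lemma truncLoop_map (X : List (List Char)) : ∀ chars budget : Int,
    pvTruncLoop (X.map String.ofList) chars budget = (keptC X (budget - chars)).map String.ofList := by
  induction X with
  | nil => intro chars budget; simp [pvTruncLoop, keptC]
  | cons l ls ih =>
    intro chars budget
    rw [List.map_cons, pvTruncLoop_cons, keptC_cons]
    have hlen : PySem.Str.len (String.ofList l) = (l.length : Int) := by
      simp [PySem.Str.len]
    by_cases h : (l.length : Int) + 1 > budget - chars
    · rw [if_pos (by rw [hlen]; omega), if_pos h, List.map_nil]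
    · rw [if_neg (by rw [hlen]; omega), if_neg h, hlen, List.map_cons, ih]
      have : budget - (chars + (l.length : Int) + 1) = budget - chars - l.length - 1 := by ring
      rw [this]

lemma lines_eq (s : String) :
    (PySem.Str.split? s "\n").getD [] = (pvLinesC s.toList).map String.ofList := by
  unfold PySem.Str.split? PySem.Chars.split?
  have hnl : ("\n" : String).toList = ['\n'] := by decide
  rw [hnl]
  simp [splitOn_eq]

lemma note_toList (r : Int) :
    ("\n[... " ++ PySem.Int.toStr r
      ++ " more lines truncated, use browser_snapshot for full content]").toList = pvNoteC r := by
  simp [pvNoteC, PySem.Int.toList_toStr]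

lemma portA_chars (s : String) (mc : Int) (h : ¬ PySem.Str.len s ≤ mc) :
    (truncate_snapshot_py s mc).toList
      = PySem.Chars.join ['\n']
          (keptC (pvLinesC s.toList) (mc - 80)
            ++ [pvNoteC (((pvLinesC s.toList).length : Int)
                  - ((keptC (pvLinesC s.toList) (mc - 80)).length : Int))]) := by
  have hloop : pvTruncLoop ((pvLinesC s.toList).map String.ofList) 0 (mc - 80)
      = (keptC (pvLinesC s.toList) (mc - 80)).map String.ofList := by
    rw [truncLoop_map]
    norm_num
  have hlt : (keptC (pvLinesC s.toList) (mc - 80)).length < (pvLinesC s.toList).length := by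
    apply keptC_lt _ _ (pvLinesC_ne_nil _)
    rw [join_pvLinesC, PySem.Str.len_eq] at *
    omega
  simp only [truncate_snapshot_py, lines_eq, hloop, List.length_map]
  rw [if_neg h, if_pos (by omega :
    (0 : Int) < ((pvLinesC s.toList).length : Int) - ((keptC (pvLinesC s.toList) (mc - 80)).length : Int))]
  have hnl : ("\n" : String).toList = ['\n'] := by decide
  simp only [PySem.Str.join, String.toList_ofList, hnl, List.map_append, List.map_map,
    List.map_cons, List.map_nil, Function.comp_def, List.map_id_fun', id_eq, note_toList]

lemma portB_chars (s : String) (mc : Int) (h : ¬ PySem.Str.len s ≤ mc) :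
    (truncate_snapshot_py_alt s mc).toList = pvBCore s.toList (mc - 80) := by
  have hnl : ("\n" : String).toList = ['\n'] := by decide
  have hwin : (PySem.Str.slice s none (some (max 0 (mc - 80)))).toList
      = s.toList.take (max 0 (mc - 80)).toNat := by
    simp only [PySem.Str.slice, String.toList_ofList, PySem.Chars.slice]
    rw [PySem.List.slice_to _ (le_max_left 0 (mc - 80))]
  have hrf : PySem.Str.rfind (PySem.Str.slice s none (some (max 0 (mc - 80)))) "\n"
      = pvRLast (s.toList.take (max 0 (mc - 80)).toNat) := by
    rw [PySem.Str.rfind, hwin, hnl, rfindC_eq]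
  simp only [truncate_snapshot_py_alt]
  rw [if_neg h, hrf]
  simp only [pvBCore]
  by_cases hc : pvRLast (s.toList.take (max 0 (mc - 80)).toNat) < 0
  · rw [if_pos hc, if_pos hc]
    simp only [String.toList_append, PySem.Int.toList_toStr, PySem.Str.count, hnl, countC_eq]
    simp [pvNoteC]
  · rw [if_neg hc, if_neg hc]
    set cut := pvRLast (s.toList.take (max 0 (mc - 80)).toNat) with hcut
    have hc0 : 0 ≤ cut := by omega
    have hsl1 : (PySem.Str.slice s none (some cut)).toList = s.toList.take cut.toNat := by
      simp only [PySem.Str.slice, String.toList_ofList, PySem.Chars.slice]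
      rw [PySem.List.slice_to _ hc0]
    have hsl2 : (PySem.Str.slice s (some (cut + 1)) none).toList = s.toList.drop (cut.toNat + 1) := by
      simp only [PySem.Str.slice, String.toList_ofList, PySem.Chars.slice]
      rw [PySem.List.slice_from _ (by omega : (0 : Int) ≤ cut + 1)]
      congr 1
      omega
    simp only [String.toList_append, PySem.Int.toList_toStr, PySem.Str.count, hsl1, hsl2, hnl,
      countC_eq]
    simp [pvNoteC]

-- ===== VERDICT (by name: the statement is the Claim_ definition above) =====
theorem truncate_snapshot_py_spec : Claim_equal_truncate_snapshot_py := by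
  intro s mc _
  unfold Spec_truncate_snapshot_py
  by_cases h : PySem.Str.len s ≤ mc
  · unfold truncate_snapshot_py truncate_snapshot_py_alt
    rw [if_pos h, if_pos h]
  · apply String.toList_inj.mp
    rw [portA_chars s mc h, portB_chars s mc h]
    have hb : (mc - 80 : Int) ≤ ((PySem.Chars.join ['\n'] (pvLinesC s.toList)).length : Int) := by
      rw [join_pvLinesC]
      rw [PySem.Str.len_eq] at h
      omega
    rw [pv_master (pvLinesC s.toList) (mc - 80) (pvLinesC_ne_nil _) (pvLinesC_no_nl _) hb,
      join_pvLinesC]
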